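-- pv_equiv track=rewrite | github.com/foggy-projects/foggy-odoo-bridge | foggy_mcp/lib/foggy/dataset_model/semantic/service.py | _parse_time_window_comparative_alias
-- ===== SOURCE A (Python) =====
-- from typing import Any, Callable, Dict, List, Optional, Tuple
--
-- def _parse_time_window_comparative_alias(
--
--     column: str,
-- ) -> Tuple[Optional[str], Optional[str]]:
--     for suffix in ("prior", "diff", "ratio"):
--         marker = f"__{suffix}"
--         if column.endswith(marker):
--             return column[:-len(marker)], suffix
--     return None, None
-- ===== SOURCE B (Python) =====
-- def _parse_time_window_comparative_alias(column):
--     base, sep, tail = column.rpartition("__")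
--     if sep and tail in {"prior", "diff", "ratio"}:
--         return base, tail
--     return None, None
-- ===== Notes on version B (the rewrite author's own statement) =====
-- stated objective: simpler
-- what changed: B replaces the loop over three suffixes with repeated endswith tests by a single rpartition split at the rightmost double-underscore followed by one set-membership test on the tail.
import Mathlib
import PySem

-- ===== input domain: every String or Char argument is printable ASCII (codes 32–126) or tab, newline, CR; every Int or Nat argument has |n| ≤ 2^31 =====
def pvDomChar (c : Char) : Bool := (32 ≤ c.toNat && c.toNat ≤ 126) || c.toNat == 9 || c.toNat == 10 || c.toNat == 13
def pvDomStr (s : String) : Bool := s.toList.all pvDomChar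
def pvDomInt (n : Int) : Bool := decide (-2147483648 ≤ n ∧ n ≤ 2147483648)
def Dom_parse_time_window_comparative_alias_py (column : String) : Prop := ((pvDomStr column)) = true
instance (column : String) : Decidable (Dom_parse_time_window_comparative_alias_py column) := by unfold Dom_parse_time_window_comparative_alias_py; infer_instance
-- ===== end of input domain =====

-- B replaces A's loop of three endswith tests by one rightmost-'__' split (rpartition) plus a set-membership test; objective: simpler.

-- ===== PORT A =====
-- for suffix in ("prior","diff","ratio"): if column.endswith("__"+suffix): return column[:-len(marker)], suffix
def parse_time_window_comparative_alias_py (column : String) : Option String × Option String :=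
  if PySem.Str.endswith column "__prior" then
    (some (PySem.Str.slice column none (some (-7))), some "prior")
  else if PySem.Str.endswith column "__diff" then
    (some (PySem.Str.slice column none (some (-6))), some "diff")
  else if PySem.Str.endswith column "__ratio" then
    (some (PySem.Str.slice column none (some (-7))), some "ratio")
  else (none, none)

-- ===== PORT B =====
-- hand port of str.rpartition("__") (PySem has no rpartition): scan the REVERSED char list for the
-- first adjacent '_','_' pair = rightmost "__" in the original; exact for the two-char separator "__".
-- returns (reversed tail-before-match, reversed base-after-match), i.e. (tail.reverse, base.reverse).
def pvRfind2 : List Char → Option (List Char × List Char)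
  | [] => none
  | [_] => none
  | a :: b :: rest =>
    if a = '_' ∧ b = '_' then some ([], rest)
    else (pvRfind2 (b :: rest)).map (fun p => (a :: p.1, p.2))

-- base, sep, tail = column.rpartition("__"); if sep and tail in {"prior","diff","ratio"}: return base, tail; return None, None
def parse_time_window_comparative_alias_py_alt (column : String) : Option String × Option String :=
  match pvRfind2 column.toList.reverse with
  | some (t, b) =>
      let tail := String.ofList t.reverse
      if tail = "prior" ∨ tail = "diff" ∨ tail = "ratio" then
        (some (String.ofList b.reverse), some tail)
      else (none, none)
  | none => (none, none)

-- ===== PRECONDITION & SPEC =====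
def Spec_parse_time_window_comparative_alias_py (column : String) (out : Option String × Option String) : Prop := out = parse_time_window_comparative_alias_py_alt column
instance (column : String) (out : Option String × Option String) : Decidable (Spec_parse_time_window_comparative_alias_py column out) := by unfold Spec_parse_time_window_comparative_alias_py; infer_instance

-- ===== CLAIM (what is proved, stated in full; the proofs are below) =====
def Claim_equal_parse_time_window_comparative_alias_py : Prop := ∀ (column : String), Dom_parse_time_window_comparative_alias_py column → Spec_parse_time_window_comparative_alias_py column (parse_time_window_comparative_alias_py column)

-- ===== LEMMAS AND PROOFS =====

-- a successful pvRfind2 decomposes the list around a '_','_' pair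
theorem pvRfind2_decomp : ∀ (rl t b : List Char), pvRfind2 rl = some (t, b) → rl = t ++ '_' :: '_' :: b := by
  intro rl
  induction rl with
  | nil => intro t b h; simp [pvRfind2] at h
  | cons a tl ih =>
    cases tl with
    | nil => intro t b h; simp [pvRfind2] at h
    | cons c rest =>
      intro t b h
      by_cases hc : a = '_' ∧ c = '_'
      · rw [pvRfind2, if_pos hc] at h
        obtain ⟨h1, h2⟩ := Prod.mk.injEq _ _ _ _ ▸ Option.some.injEq _ _ ▸ h
        subst h1; subst h2
        simp [hc.1, hc.2]
      · rw [pvRfind2, if_neg hc] at h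
        rcases Option.map_eq_some_iff.mp h with ⟨p, hp, hpe⟩
        obtain ⟨h1, h2⟩ := Prod.mk.injEq _ _ _ _ ▸ hpe
        subst h1; subst h2
        have := ih p.1 p.2 (by rw [hp])
        simp [this]

theorem parse_equiv (column : String) :
    parse_time_window_comparative_alias_py column = parse_time_window_comparative_alias_py_alt column := by
  by_cases h1 : "__prior".toList <:+ column.toList
  · obtain ⟨pre, hpre⟩ := h1
    have hA : PySem.Str.endswith column "__prior" = true := by
      simp [PySem.Chars.endswith_iff]; exact ⟨pre, hpre⟩
    have hrev : column.toList.reverse = 'r'::'o'::'i'::'r'::'p'::'_'::'_'::pre.reverse := by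
      rw [← hpre, show "__prior".toList = ['_','_','p','r','i','o','r'] from by decide]; simp
    have hsl : (PySem.Str.slice column none (some (-7))).toList = pre := by
      rw [PySem.Str.toList_slice, PySem.Chars.slice_eq_listSlice,
          PySem.List.slice_to_neg_ofNat _ 7 (by omega), ← hpre]
      simp
    unfold parse_time_window_comparative_alias_py parse_time_window_comparative_alias_py_alt
    rw [if_pos hA, hrev]
    simp [pvRfind2]
    exact String.toList_injective (by simp [hsl])
  · by_cases h2 : "__diff".toList <:+ column.toList
    · obtain ⟨pre, hpre⟩ := h2
      have hA1 : ¬ PySem.Str.endswith column "__prior" = true := by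
        simp [PySem.Chars.endswith_iff]; exact h1
      have hA : PySem.Str.endswith column "__diff" = true := by
        simp [PySem.Chars.endswith_iff]; exact ⟨pre, hpre⟩
      have hrev : column.toList.reverse = 'f'::'f'::'i'::'d'::'_'::'_'::pre.reverse := by
        rw [← hpre, show "__diff".toList = ['_','_','d','i','f','f'] from by decide]; simp
      have hsl : (PySem.Str.slice column none (some (-6))).toList = pre := by
        rw [PySem.Str.toList_slice, PySem.Chars.slice_eq_listSlice,
            PySem.List.slice_to_neg_ofNat _ 6 (by omega), ← hpre]
        simp
      unfold parse_time_window_comparative_alias_py parse_time_window_comparative_alias_py_alt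
      rw [if_neg hA1, if_pos hA, hrev]
      simp [pvRfind2]
      exact String.toList_injective (by simp [hsl])
    · by_cases h3 : "__ratio".toList <:+ column.toList
      · obtain ⟨pre, hpre⟩ := h3
        have hA1 : ¬ PySem.Str.endswith column "__prior" = true := by
          simp [PySem.Chars.endswith_iff]; exact h1
        have hA2 : ¬ PySem.Str.endswith column "__diff" = true := by
          simp [PySem.Chars.endswith_iff]; exact h2
        have hA : PySem.Str.endswith column "__ratio" = true := by
          simp [PySem.Chars.endswith_iff]; exact ⟨pre, hpre⟩
        have hrev : column.toList.reverse = 'o'::'i'::'t'::'a'::'r'::'_'::'_'::pre.reverse := by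
          rw [← hpre, show "__ratio".toList = ['_','_','r','a','t','i','o'] from by decide]; simp
        have hsl : (PySem.Str.slice column none (some (-7))).toList = pre := by
          rw [PySem.Str.toList_slice, PySem.Chars.slice_eq_listSlice,
              PySem.List.slice_to_neg_ofNat _ 7 (by omega), ← hpre]
          simp
        unfold parse_time_window_comparative_alias_py parse_time_window_comparative_alias_py_alt
        rw [if_neg hA1, if_neg hA2, if_pos hA, hrev]
        simp [pvRfind2]
        exact String.toList_injective (by simp [hsl])
      · have hA1 : ¬ PySem.Str.endswith column "__prior" = true := by
          simp [PySem.Chars.endswith_iff]; exact h1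
        have hA2 : ¬ PySem.Str.endswith column "__diff" = true := by
          simp [PySem.Chars.endswith_iff]; exact h2
        have hA3 : ¬ PySem.Str.endswith column "__ratio" = true := by
          simp [PySem.Chars.endswith_iff]; exact h3
        unfold parse_time_window_comparative_alias_py parse_time_window_comparative_alias_py_alt
        rw [if_neg hA1, if_neg hA2, if_neg hA3]
        cases hr : pvRfind2 column.toList.reverse with
        | none => rfl
        | some p =>
          obtain ⟨t, b⟩ := p
          have hdec := pvRfind2_decomp _ _ _ hr
          have hcol : column.toList = b.reverse ++ '_' :: '_' :: t.reverse := by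
            simpa using congrArg List.reverse hdec
          have hcond : ¬ (String.ofList t.reverse = "prior" ∨ String.ofList t.reverse = "diff" ∨
              String.ofList t.reverse = "ratio") := by
            rintro (htail | htail | htail)
            · have ht : t.reverse = ['p','r','i','o','r'] := by
                have := congrArg String.toList htail
                simpa using this
              exact h1 ⟨b.reverse, by rw [show "__prior".toList = ['_','_','p','r','i','o','r'] from by decide, hcol, ht]⟩
            · have ht : t.reverse = ['d','i','f','f'] := by
                have := congrArg String.toList htail
                simpa using this
              exact h2 ⟨b.reverse, by rw [show "__diff".toList = ['_','_','d','i','f','f'] from by decide, hcol, ht]⟩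
            · have ht : t.reverse = ['r','a','t','i','o'] := by
                have := congrArg String.toList htail
                simpa using this
              exact h3 ⟨b.reverse, by rw [show "__ratio".toList = ['_','_','r','a','t','i','o'] from by decide, hcol, ht]⟩
          simp [hcond]

-- ===== VERDICT (by name: the statement is the Claim_ definition above) =====
theorem parse_time_window_comparative_alias_py_spec : Claim_equal_parse_time_window_comparative_alias_py := by
  intro column _
  exact parse_equiv column
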